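-- pv_equiv track=rewrite | github.com/Rishita-Garg/iNFORMATION-sECURITY | 1 -B.py | decrypt_multiplicative
-- ===== SOURCE A (Python) =====
-- def multiplicative_inverse(a, m):
--     m0, x0, x1 = m, 0, 1
--     if m == 1:
--         return 0
--     while a > 1:
--         q = a // m
--         m, a = a % m, m
--         x0, x1 = x1 - q * x0, x0
--     if x1 < 0:
--         x1 += m0
--     return x1
--
-- def decrypt_multiplicative(ciphertext, a):
--     a_inv = multiplicative_inverse(a, 26)
--     result = ""
--     for char in ciphertext:
--         if char.isupper():
--             result += chr(((ord(char) - 65) * a_inv) % 26 + 65)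
--         elif char.islower():
--             result += chr(((ord(char) - 97) * a_inv) % 26 + 97)
--         elif char == ' ':
--             result += char
--         else:
--             result += char
--     return result
-- ===== SOURCE B (Python) =====
-- def multiplicative_inverse(a, m):
--     # same value as the iterative extended Euclid, written as a recursion
--     m0 = m
--     if m == 1:
--         return 0
--     def egcd(a, m, x0, x1):
--         if a <= 1:
--             return x1
--         return egcd(m, a % m, x1 - (a // m) * x0, x0)
--     x1 = egcd(a, m, 0, 1)
--     return x1 + m0 if x1 < 0 else x1
--
-- def decrypt_multiplicative(ciphertext, a):
--     a_inv = multiplicative_inverse(a, 26)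
--     table = str.maketrans(
--         {chr(65 + c): chr((c * a_inv) % 26 + 65) for c in range(26)}
--         | {chr(97 + c): chr((c * a_inv) % 26 + 97) for c in range(26)})
--     return ciphertext.translate(table)
-- ===== Notes on version B (the rewrite author's own statement) =====
-- stated objective: idiomatic
-- what changed: B replaces A's per-character branching loop with the standard-library pattern: build the full 52-letter decryption table once with str.maketrans and decrypt in a single ciphertext.translate call (non-letters pass through), and phrases the extended-Euclid inverse as a recursion instead of A's while loop.
import Mathlib
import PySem

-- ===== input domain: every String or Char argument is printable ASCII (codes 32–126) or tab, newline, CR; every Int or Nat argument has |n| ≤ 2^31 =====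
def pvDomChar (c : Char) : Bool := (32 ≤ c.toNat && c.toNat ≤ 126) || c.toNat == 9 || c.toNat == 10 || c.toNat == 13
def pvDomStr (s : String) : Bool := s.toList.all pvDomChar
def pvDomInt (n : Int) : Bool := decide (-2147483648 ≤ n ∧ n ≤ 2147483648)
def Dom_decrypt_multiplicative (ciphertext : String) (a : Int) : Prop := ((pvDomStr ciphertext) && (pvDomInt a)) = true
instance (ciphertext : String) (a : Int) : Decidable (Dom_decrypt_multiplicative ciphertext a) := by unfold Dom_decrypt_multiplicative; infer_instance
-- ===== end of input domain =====

-- B builds the whole 52-letter translation table up front (str.maketrans) and decrypts with one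
-- ciphertext.translate call instead of A's per-character branching loop, and phrases the extended
-- Euclid inverse as a recursion instead of A's while loop; equivalence is proved on Pre_, which
-- excludes only the inputs where Python A raises ZeroDivisionError (both Pythons raise there).

-- ===== PORT A =====
-- the extended-Euclid while-loop of multiplicative_inverse; `none` = Python's ZeroDivisionError (m = 0 with a > 1)
def pvMulInvLoop (a m x0 x1 : Int) : Option (Int × Int) :=
  if _h : a > 1 then
    if _hm : m = 0 then none
    else
      pvMulInvLoop m (PySem.Int.mod a m) (x1 - (PySem.Int.floordiv a m) * x0) x0
  else some (x0, x1)
termination_by m.natAbs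
decreasing_by
  have h1 := PySem.Int.mod_nonneg a (b := m)
  have h2 := PySem.Int.mod_lt a (b := m)
  have h3 := PySem.Int.mod_neg_bounds a (b := m)
  rcases lt_trichotomy m 0 with h | h | h
  · have := h3 h; omega
  · exact absurd h _hm
  · have := h1 h; have := h2 h; omega

def multiplicative_inverse (a m : Int) : Option Int :=
  let m0 := m
  if m = 1 then some 0
  else
    match pvMulInvLoop a m 0 1 with
    | none => none
    | some (_, x1) => if x1 < 0 then some (x1 + m0) else some x1

def decrypt_multiplicative (ciphertext : String) (a : Int) : String :=
  match multiplicative_inverse a 26 with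
  | none => ""   -- Python raises here; excluded by Pre_
  | some a_inv =>
    String.ofList (ciphertext.toList.foldl (fun result char =>
      if PySem.Chars.isupper char then
        result ++ [Char.ofNat (PySem.Int.mod (((char.toNat : Int) - 65) * a_inv) 26 + 65).toNat]
      else if PySem.Chars.islower char then
        result ++ [Char.ofNat (PySem.Int.mod (((char.toNat : Int) - 97) * a_inv) 26 + 97).toNat]
      else if char = ' ' then
        result ++ [char]
      else
        result ++ [char]) [])

-- ===== PORT B =====
-- Source B's recursive egcd helper; `none` = ZeroDivisionError (m = 0 with a > 1), as in A's loop
def pvEgcd (a m x0 x1 : Int) : Option Int :=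
  if a ≤ 1 then some x1
  else if _hm : m = 0 then none
  else pvEgcd m (PySem.Int.mod a m) (x1 - (PySem.Int.floordiv a m) * x0) x0
termination_by m.natAbs
decreasing_by
  have h1 := PySem.Int.mod_nonneg a (b := m)
  have h2 := PySem.Int.mod_lt a (b := m)
  have h3 := PySem.Int.mod_neg_bounds a (b := m)
  rcases lt_trichotomy m 0 with h | h | h
  · have := h3 h; omega
  · exact absurd h _hm
  · have := h1 h; have := h2 h; omega

def multiplicative_inverse_b (a m : Int) : Option Int :=
  let m0 := m
  if m = 1 then some 0
  else
    match pvEgcd a m 0 1 with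
    | none => none
    | some x1 => some (if x1 < 0 then x1 + m0 else x1)

-- str.maketrans of the two 26-entry dict comprehensions merged with '|': since the 52 keys are
-- distinct letters, the resulting dict is exactly this association list in insertion order
def pvTable (a_inv : Int) : PySem.Dict Char Char :=
  PySem.Dict.mk (
    (PySem.List.pyRange 0 26 1).map (fun c =>
      (Char.ofNat (65 + c).toNat, Char.ofNat (PySem.Int.mod (c * a_inv) 26 + 65).toNat))
    ++ (PySem.List.pyRange 0 26 1).map (fun c =>
      (Char.ofNat (97 + c).toNat, Char.ofNat (PySem.Int.mod (c * a_inv) 26 + 97).toNat)))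

def decrypt_multiplicative_alt (ciphertext : String) (a : Int) : String :=
  match multiplicative_inverse_b a 26 with
  | none => ""   -- Python raises here; excluded by Pre_
  | some a_inv =>
    let table := pvTable a_inv
    -- ciphertext.translate(table): chars in the table are mapped, all others pass through
    String.ofList (ciphertext.toList.map (fun ch => table.getD ch ch))

-- ===== PRECONDITION & SPEC =====
-- Pre_ excludes exactly the inputs where Python A raises ZeroDivisionError in the Euclid loop:
-- a > 1 with gcd(a, 26) ≠ 1 (a even or divisible by 13).
def Pre_decrypt_multiplicative (ciphertext : String) (a : Int) : Prop :=
  a ≤ 1 ∨ (PySem.Int.mod a 2 = 1 ∧ PySem.Int.mod a 13 ≠ 0)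
instance (ciphertext : String) (a : Int) : Decidable (Pre_decrypt_multiplicative ciphertext a) := by
  unfold Pre_decrypt_multiplicative; infer_instance

def pvWitness_decrypt_multiplicative : String × Int := ("Khoor Zruog!", 3)

def Spec_decrypt_multiplicative (ciphertext : String) (a : Int) (out : String) : Prop := out = decrypt_multiplicative_alt ciphertext a
instance (ciphertext : String) (a : Int) (out : String) : Decidable (Spec_decrypt_multiplicative ciphertext a out) := by unfold Spec_decrypt_multiplicative; infer_instance

-- ===== CLAIM (what is proved, stated in full; the proofs are below) =====
def Claim_equal_decrypt_multiplicative : Prop := ∀ (ciphertext : String) (a : Int), Dom_decrypt_multiplicative ciphertext a → Pre_decrypt_multiplicative ciphertext a → Spec_decrypt_multiplicative ciphertext a (decrypt_multiplicative ciphertext a)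

-- ===== LEMMAS AND PROOFS =====

-- the recursive egcd returns exactly the x1 component of A's while-loop state (same guard, same steps)
theorem pvEgcd_eq_loop (a m x0 x1 : Int) :
    pvEgcd a m x0 x1 = (pvMulInvLoop a m x0 x1).map (fun p => p.2) := by
  induction a, m, x0, x1 using pvEgcd.induct with
  | case1 a m x0 x1 h =>
    rw [pvEgcd, pvMulInvLoop]
    simp [h, not_lt.mpr h]
  | case2 a x0 x1 h =>
    rw [pvEgcd, pvMulInvLoop]
    simp [h, not_le.mp h]
  | case3 a m x0 x1 h hm ih =>
    rw [pvEgcd, pvMulInvLoop]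
    rw [if_neg h, dif_pos (not_le.mp h), dif_neg hm, dif_neg hm]
    exact ih

-- hence the two multiplicative_inverse functions agree everywhere
theorem pvInv_eq (a m : Int) : multiplicative_inverse_b a m = multiplicative_inverse a m := by
  unfold multiplicative_inverse multiplicative_inverse_b
  rw [pvEgcd_eq_loop]
  cases pvMulInvLoop a m 0 1 with
  | none => rfl
  | some p => obtain ⟨x0, x1⟩ := p; simp only [Option.map_some]; split_ifs <;> rfl

theorem pvToNat_ofNat (i : Nat) (h : i < 55296) : (Char.ofNat i).toNat = i := by
  rw [Char.toNat_ofNat, if_pos (Or.inl h)]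

-- lookup in an assoc list keyed by the consecutive characters range' i n
theorem pv_get?_mk_range' (ch : Char) (v : Nat → Char) : ∀ (n i : Nat), i + n ≤ 55296 →
    (PySem.Dict.mk ((List.range' i n).map (fun c => (Char.ofNat c, v c)))).get? ch
      = if i ≤ ch.toNat ∧ ch.toNat < i + n then some (v ch.toNat) else none := by
  intro n
  induction n with
  | zero => intro i _; simp [PySem.Dict.get?]
  | succ n ih =>
    intro i hle
    rw [List.range'_succ, List.map_cons, PySem.Dict.get?_mk_cons]
    by_cases hc : ch.toNat = i
    · have hv : Char.ofNat i = ch := by subst hc; exact Char.ofNat_toNat ch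
      rw [if_pos (by simp [hv]), hc, if_pos (by omega)]
    · have hne : (Char.ofNat i == ch) = false := by
        apply beq_false_of_ne
        intro h
        exact hc (by rw [← h, pvToNat_ofNat i (by omega)])
      rw [hne]
      simp only [Bool.false_eq_true, if_false]
      rw [ih (i + 1) (by omega)]
      split
      · rw [if_pos (by omega)]
      · rw [if_neg (by omega)]

theorem pv_get?_mk_append {l1 l2 : List (Char × Char)} (ch : Char) :
    (PySem.Dict.mk (l1 ++ l2)).get? ch
      = ((PySem.Dict.mk l1).get? ch).or ((PySem.Dict.mk l2).get? ch) := by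
  induction l1 with
  | nil => simp [PySem.Dict.get?]
  | cons p l ih =>
    obtain ⟨k, v⟩ := p
    rw [List.cons_append, PySem.Dict.get?_mk_cons, PySem.Dict.get?_mk_cons]
    split
    · rfl
    · exact ih

-- the decrypted letter for ordinal c in the block starting at base
def pvVal (a_inv base : Int) (c : Nat) : Char :=
  Char.ofNat (PySem.Int.mod (((c : Int) - base) * a_inv) 26 + base).toNat

-- one comprehension block of the table, rewritten as a map over its key ordinals
theorem pv_block_eq (a_inv : Int) (base : Nat) :
    (PySem.List.pyRange 0 26 1).map (fun c =>
        (Char.ofNat ((base : Int) + c).toNat, Char.ofNat (PySem.Int.mod (c * a_inv) 26 + base).toNat))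
      = (List.range' base 26).map (fun c => (Char.ofNat c, pvVal a_inv base c)) := by
  rw [PySem.List.pyRange_one, List.range'_eq_map_range, List.map_map, List.map_map]
  norm_num
  apply List.map_congr_left
  intro k _
  simp only [Function.comp_apply]
  unfold pvVal
  have harg : (((base + k : Nat) : Int) - (base : Int)) = (k : Int) := by push_cast; ring
  rw [harg, Prod.mk.injEq, PySem.Int.mod_eq_emod_of_pos (show (0:Int) < 26 by norm_num)]
  constructor
  · congr 1
  · rfl

theorem pv_table_get (a_inv : Int) (ch : Char) :
    (pvTable a_inv).get? ch =
      if 65 ≤ ch.toNat ∧ ch.toNat < 91 then some (pvVal a_inv 65 ch.toNat)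
      else if 97 ≤ ch.toNat ∧ ch.toNat < 123 then some (pvVal a_inv 97 ch.toNat)
      else none := by
  unfold pvTable
  rw [show (65 : Int) = ((65 : Nat) : Int) by norm_num]
  rw [show (97 : Int) = ((97 : Nat) : Int) by norm_num]
  rw [pv_block_eq a_inv 65, pv_block_eq a_inv 97, pv_get?_mk_append,
    pv_get?_mk_range' ch _ 26 65 (by omega), pv_get?_mk_range' ch _ 26 97 (by omega)]
  norm_num
  split_ifs <;> rfl

-- per-character agreement: A's branch on char is exactly B's table translation
theorem pvChar_eq (a_inv : Int) (char : Char) :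
    (if PySem.Chars.isupper char then
        Char.ofNat (PySem.Int.mod (((char.toNat : Int) - 65) * a_inv) 26 + 65).toNat
      else if PySem.Chars.islower char then
        Char.ofNat (PySem.Int.mod (((char.toNat : Int) - 97) * a_inv) 26 + 97).toNat
      else if char = ' ' then char else char)
    = (pvTable a_inv).getD char char := by
  have hup : PySem.Chars.isupper char = true ↔ 65 ≤ char.toNat ∧ char.toNat ≤ 90 := by
    simp only [PySem.Chars.isupper, Bool.and_eq_true, decide_eq_true_eq, Char.le_def,
      UInt32.le_iff_toNat_le, Char.toNat_val]
    exact ⟨fun ⟨h1, h2⟩ => ⟨h1, h2⟩, fun ⟨h1, h2⟩ => ⟨h1, h2⟩⟩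
  have hlo : PySem.Chars.islower char = true ↔ 97 ≤ char.toNat ∧ char.toNat ≤ 122 := by
    simp only [PySem.Chars.islower, Bool.and_eq_true, decide_eq_true_eq, Char.le_def,
      UInt32.le_iff_toNat_le, Char.toNat_val]
    exact ⟨fun ⟨h1, h2⟩ => ⟨h1, h2⟩, fun ⟨h1, h2⟩ => ⟨h1, h2⟩⟩
  rw [PySem.Dict.getD_eq_get?_getD, pv_table_get]
  by_cases h1 : PySem.Chars.isupper char = true
  · obtain ⟨hl, hh⟩ := hup.mp h1
    rw [if_pos h1, if_pos (show 65 ≤ char.toNat ∧ char.toNat < 91 from ⟨hl, by omega⟩),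
      Option.getD_some]
    unfold pvVal
    rfl
  · by_cases h2 : PySem.Chars.islower char = true
    · obtain ⟨hl, hh⟩ := hlo.mp h2
      have hno : ¬ (65 ≤ char.toNat ∧ char.toNat < 91) := fun hx => h1 (hup.mpr ⟨hx.1, by omega⟩)
      rw [if_neg h1, if_pos h2, if_neg hno,
        if_pos (show 97 ≤ char.toNat ∧ char.toNat < 123 from ⟨hl, by omega⟩), Option.getD_some]
      unfold pvVal
      rfl
    · have hno1 : ¬ (65 ≤ char.toNat ∧ char.toNat < 91) := fun hx => h1 (hup.mpr ⟨hx.1, by omega⟩)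
      have hno2 : ¬ (97 ≤ char.toNat ∧ char.toNat < 123) := fun hx => h2 (hlo.mpr ⟨hx.1, by omega⟩)
      rw [if_neg h1, if_neg h2, if_neg hno1, if_neg hno2]
      split <;> rfl

-- ===== VERDICT (by name: the statement is the Claim_ definition above) =====
theorem decrypt_multiplicative_spec : Claim_equal_decrypt_multiplicative := by
  intro ciphertext a _ _
  unfold Spec_decrypt_multiplicative decrypt_multiplicative decrypt_multiplicative_alt
  rw [pvInv_eq]
  cases hmi : multiplicative_inverse a 26 with
  | none => rfl
  | some a_inv =>
    simp only []
    congr 1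
    have hbody : (fun (result : List Char) char =>
        if PySem.Chars.isupper char then
          result ++ [Char.ofNat (PySem.Int.mod (((char.toNat : Int) - 65) * a_inv) 26 + 65).toNat]
        else if PySem.Chars.islower char then
          result ++ [Char.ofNat (PySem.Int.mod (((char.toNat : Int) - 97) * a_inv) 26 + 97).toNat]
        else if char = ' ' then result ++ [char] else result ++ [char])
        = (fun (result : List Char) char => result ++ [(pvTable a_inv).getD char char]) := by
      funext result char
      rw [← pvChar_eq a_inv char]
      split_ifs <;> rfl
    rw [hbody, PySem.List.foldl_append_singleton_eq_map, List.nil_append]
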